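-- pv_equiv track=rewrite | github.com/TomZurales/Thesis | code/observability_generator/data_generator.py | remove_rotational_duplicates
-- ===== SOURCE A (Python) =====
-- def canonical_form(t):
--     rotations = [t[i:] + t[:i] for i in range(len(t))]
--     return min(rotations)
--
-- def remove_rotational_duplicates(tuples):
--     seen = set()
--     result = []
--     for t in tuples:
--         canonical = canonical_form(t)
--         if canonical not in seen:
--             seen.add(canonical)
--             result.append(t)
--     return result
-- ===== SOURCE B (Python) =====
-- def remove_rotational_duplicates(tuples):
--     # Instead of canonicalising each tuple, store every rotation of each kept
--     # tuple in the seen-set; a duplicate is then a single hash lookup.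
--     seen = set()
--     result = []
--     for t in tuples:
--         if t not in seen:
--             result.append(t)
--             seen.add(t)
--             for i in range(1, len(t)):
--                 seen.add(t[i:] + t[:i])
--     return result
-- ===== Notes on version B (the rewrite author's own statement) =====
-- stated objective: alternative
-- what changed: A canonicalises every tuple by taking the lexicographic minimum of all its rotations and dedups on canonical forms; B keeps no canonical form at all and instead inserts every rotation of each kept tuple into the seen-set, so the duplicate test is a set lookup of the tuple itself.
-- outside the precondition, e.g. on remove_rotational_duplicates([()]): A raises ValueError, B returns [()]
import Mathlib
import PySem

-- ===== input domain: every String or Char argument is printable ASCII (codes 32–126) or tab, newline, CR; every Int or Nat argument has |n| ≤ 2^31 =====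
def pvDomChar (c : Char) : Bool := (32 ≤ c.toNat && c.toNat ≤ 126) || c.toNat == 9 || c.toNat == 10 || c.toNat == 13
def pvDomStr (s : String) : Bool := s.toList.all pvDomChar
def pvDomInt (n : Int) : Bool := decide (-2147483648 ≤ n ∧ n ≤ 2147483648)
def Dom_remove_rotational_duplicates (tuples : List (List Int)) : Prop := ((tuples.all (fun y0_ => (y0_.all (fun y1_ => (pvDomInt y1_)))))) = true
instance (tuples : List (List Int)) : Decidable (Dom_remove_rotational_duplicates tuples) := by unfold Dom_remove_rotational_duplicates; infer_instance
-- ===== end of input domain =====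

-- B replaces A's per-tuple canonical form (min over all rotations) by a seen-set
-- holding every rotation of each kept tuple, so the duplicate test is a set lookup of the tuple itself;
-- an alternative algorithm of similar overall cost (no speed claim).

-- ===== PORT A =====
-- canonical_form(t): min of all rotations; none = the ValueError of min on no rotations
def canonical_form (t : List Int) : Option (List Int) :=
  PySem.List.min?
    ((PySem.List.pyRange 0 (t.length : Int) 1).map
      (fun i => PySem.List.slice t (some i) none ++ PySem.List.slice t none (some i)))
    (fun x => x)

-- loop body of A: state = (seen, result)
def pvStepA (st : PySem.Set (List Int) × List (List Int)) (t : List Int) :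
    PySem.Set (List Int) × List (List Int) :=
  match canonical_form t with
  | none => st   -- Python raises ValueError here; excluded by Pre_
  | some c => if PySem.Set.contains st.1 c then st else (PySem.Set.add st.1 c, st.2 ++ [t])

def remove_rotational_duplicates (tuples : List (List Int)) : List (List Int) :=
  (tuples.foldl pvStepA ((PySem.Set.empty : PySem.Set (List Int)), ([] : List (List Int)))).2

-- ===== PORT B =====
-- loop body of B: if t unseen, keep it and add t and all its proper rotations to seen
def pvStepB (st : PySem.Set (List Int) × List (List Int)) (t : List Int) :
    PySem.Set (List Int) × List (List Int) :=
  if PySem.Set.contains st.1 t then st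
  else
    ((PySem.List.pyRange 1 (t.length : Int) 1).foldl
        (fun s i => PySem.Set.add s (PySem.List.slice t (some i) none ++ PySem.List.slice t none (some i)))
        (PySem.Set.add st.1 t),
     st.2 ++ [t])

def remove_rotational_duplicates_alt (tuples : List (List Int)) : List (List Int) :=
  (tuples.foldl pvStepB ((PySem.Set.empty : PySem.Set (List Int)), ([] : List (List Int)))).2

-- ===== PRECONDITION & SPEC =====
-- Pre_ excludes inputs containing a zero-length tuple, on which A's min of an empty rotation list raises ValueError.
def Pre_remove_rotational_duplicates (tuples : List (List Int)) : Prop :=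
  ([] : List Int) ∉ tuples
instance (tuples : List (List Int)) : Decidable (Pre_remove_rotational_duplicates tuples) := by
  unfold Pre_remove_rotational_duplicates; infer_instance

def pvWitness_remove_rotational_duplicates : List (List Int) := [[1, 2], [2, 1], [1, 3]]

def Spec_remove_rotational_duplicates (tuples : List (List Int)) (out : List (List Int)) : Prop :=
  out = remove_rotational_duplicates_alt tuples
instance (tuples : List (List Int)) (out : List (List Int)) : Decidable (Spec_remove_rotational_duplicates tuples out) := by
  unfold Spec_remove_rotational_duplicates; infer_instance

-- ===== CLAIM (what is proved, stated in full; the proofs are below) =====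
def Claim_equal_remove_rotational_duplicates : Prop := ∀ (tuples : List (List Int)), Dom_remove_rotational_duplicates tuples → Pre_remove_rotational_duplicates tuples → Spec_remove_rotational_duplicates tuples (remove_rotational_duplicates tuples)

-- ===== LEMMAS AND PROOFS =====

-- the DecidableLT instance elaborated into canonical_form equals the LinearOrder one
theorem pvInstEq :
    (fun (a b : List Int) => a.decidableLT b) = (List.instLinearOrder.toDecidableLT : DecidableLT (List Int)) := by
  funext a b; exact Subsingleton.elim _ _

-- A's rotation list is the list of left-rotations of t
theorem pvRotsA_eq (t : List Int) :
    (PySem.List.pyRange 0 (t.length : Int) 1).map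
      (fun i => PySem.List.slice t (some i) none ++ PySem.List.slice t none (some i))
    = (List.range t.length).map (fun k => t.rotate k) := by
  rw [PySem.List.pyRange_one]
  have h : (((t.length : Int) - 0).toNat) = t.length := by omega
  rw [h, List.map_map]
  refine List.map_congr_left (fun k hk => ?_)
  have hk' : k < t.length := List.mem_range.mp hk
  simp only [Function.comp, zero_add]
  rw [PySem.List.slice_from_natCast, PySem.List.slice_to_natCast,
    List.rotate_eq_drop_append_take (le_of_lt hk')]

theorem pv_mem_rots (t x : List Int) (ht : t ≠ []) :
    x ∈ (List.range t.length).map (fun k => t.rotate k) ↔ t ~r x := by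
  rw [List.isRotated_iff_mod]
  simp only [List.mem_map, List.mem_range]
  constructor
  · rintro ⟨k, hk, rfl⟩; exact ⟨k, le_of_lt hk, rfl⟩
  · rintro ⟨n, hn, rfl⟩
    rcases lt_or_eq_of_le hn with h | h
    · exact ⟨n, h, rfl⟩
    · refine ⟨0, ?_, ?_⟩
      · cases t with | nil => exact absurd rfl ht | cons a l => simp
      · rw [h, List.rotate_length, List.rotate_zero]

-- canonical_form of a nonempty tuple: it exists, is a rotation, and is minimal
theorem pv_canonical_spec (t : List Int) (ht : t ≠ []) :
    ∃ c, canonical_form t = some c ∧ t ~r c ∧ ∀ y, t ~r y → c ≤ y := by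
  unfold canonical_form
  rw [pvRotsA_eq]
  rcases Option.eq_none_or_eq_some
      (PySem.List.min? ((List.range t.length).map (fun k => t.rotate k)) (fun x => x)) with h | ⟨c, h⟩
  · exfalso
    rw [PySem.List.min?_eq_none_iff] at h
    have : t ∈ (List.range t.length).map (fun k => t.rotate k) :=
      (pv_mem_rots t t ht).mpr (List.IsRotated.refl t)
    rw [h] at this; exact absurd this (List.not_mem_nil)
  · refine ⟨c, h, (pv_mem_rots t c ht).mp (PySem.List.min?_mem h), fun y hy => ?_⟩
    have h' := h
    rw [pvInstEq] at h'
    exact @PySem.List.min?_isMin (List Int) (List Int) List.instLinearOrder _ _ _ h' y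
      ((pv_mem_rots t y ht).mpr hy)

theorem pv_canonical_eq_of_rot (t1 t2 : List Int) (h1 : t1 ≠ []) (h : t1 ~r t2) :
    canonical_form t1 = canonical_form t2 := by
  have h2 : t2 ≠ [] := by
    intro he; rw [he] at h; exact h1 (List.isRotated_nil_iff.mp h)
  obtain ⟨c1, hc1, hr1, hm1⟩ := pv_canonical_spec t1 h1
  obtain ⟨c2, hc2, hr2, hm2⟩ := pv_canonical_spec t2 h2
  have e1 : c1 ≤ c2 := hm1 c2 (h.trans hr2)
  have e2 : c2 ≤ c1 := hm2 c1 (h.symm.trans hr1)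
  rw [hc1, hc2, le_antisymm e1 e2]

theorem pv_rot_of_canonical_eq (t1 t2 : List Int) (h1 : t1 ≠ []) (h2 : t2 ≠ [])
    (h : canonical_form t1 = canonical_form t2) : t1 ~r t2 := by
  obtain ⟨c1, hc1, hr1, _⟩ := pv_canonical_spec t1 h1
  obtain ⟨c2, hc2, hr2, _⟩ := pv_canonical_spec t2 h2
  rw [hc1, hc2] at h
  exact (hr1.trans (Option.some_injective _ h ▸ hr2.symm))

-- membership after B's inner loop: seen gains exactly the rotations of t
theorem pv_memB_step (t : List Int) (ht : t ≠ []) (s : PySem.Set (List Int)) (x : List Int) :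
    (x ∈ (PySem.List.pyRange 1 (t.length : Int) 1).foldl
        (fun s i => PySem.Set.add s (PySem.List.slice t (some i) none ++ PySem.List.slice t none (some i)))
        (PySem.Set.add s t))
    ↔ (x ∈ s ∨ t ~r x) := by
  rw [PySem.Set.mem_foldl_add, PySem.Set.mem_add]
  constructor
  · rintro (⟨hx | rfl⟩ | ⟨i, hi, rfl⟩)
    · exact Or.inl hx
    · exact Or.inr (List.IsRotated.refl x)
    · rcases (PySem.List.mem_pyRange_one).mp hi with ⟨hi1, hi2⟩
      refine Or.inr ?_
      have h0 : (0:Int) ≤ i := by omega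
      have hle : i.toNat ≤ t.length := by omega
      rw [PySem.List.slice_from t h0, PySem.List.slice_to t (by omega : (0:Int) ≤ i),
        ← List.rotate_eq_drop_append_take hle]
      exact ⟨i.toNat, rfl⟩
  · rintro (hx | hr)
    · exact Or.inl (Or.inl hx)
    · rw [← pv_mem_rots t x ht] at hr
      rcases List.mem_map.mp hr with ⟨k, hk, rfl⟩
      have hk' : k < t.length := List.mem_range.mp hk
      rcases Nat.eq_zero_or_pos k with rfl | hkpos
      · exact Or.inl (Or.inr (List.rotate_zero t))
      · refine Or.inr ⟨(k : Int), (PySem.List.mem_pyRange_one).mpr ⟨by omega, by omega⟩, ?_⟩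
        rw [PySem.List.slice_from_natCast, PySem.List.slice_to_natCast,
          List.rotate_eq_drop_append_take (le_of_lt hk')]

-- the loop invariant
def pvInv (sA : PySem.Set (List Int)) (rA : List (List Int))
    (sB : PySem.Set (List Int)) (rB : List (List Int)) : Prop :=
  rA = rB ∧ (∀ r ∈ rA, r ≠ []) ∧
  (∀ x, x ∈ sA ↔ ∃ r ∈ rA, canonical_form r = some x) ∧
  (∀ x, x ∈ sB ↔ ∃ r ∈ rB, r ~r x)

theorem pv_loop_eq (l : List (List Int)) :
    ∀ sA rA sB rB, (∀ t ∈ l, t ≠ []) → pvInv sA rA sB rB →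
      (l.foldl pvStepA (sA, rA)).2 = (l.foldl pvStepB (sB, rB)).2 := by
  induction l with
  | nil => rintro sA rA sB rB _ ⟨hr, _, _, _⟩; simpa using hr
  | cons t l ih =>
    rintro sA rA sB rB hne ⟨hr, hrne, hsA, hsB⟩
    have ht : t ≠ [] := hne t (List.mem_cons_self)
    obtain ⟨c, hc, hrc, _⟩ := pv_canonical_spec t ht
    have hcond : PySem.Set.contains sA c = PySem.Set.contains sB t := by
      rw [Bool.eq_iff_iff, PySem.Set.contains_iff, PySem.Set.contains_iff, hsA, hsB, hr]
      constructor
      · rintro ⟨r, hrm, hcr⟩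
        refine ⟨r, hrm, ?_⟩
        have : canonical_form r = canonical_form t := by rw [hcr, hc]
        exact pv_rot_of_canonical_eq r t (hrne r (hr ▸ hrm)) ht this
      · rintro ⟨r, hrm, hrr⟩
        refine ⟨r, hrm, ?_⟩
        rw [pv_canonical_eq_of_rot r t (hrne r (hr ▸ hrm)) hrr, hc]
    simp only [List.foldl_cons]
    by_cases hmem : PySem.Set.contains sB t = true
    · have hA : pvStepA (sA, rA) t = (sA, rA) := by
        simp only [pvStepA, hc]; rw [hcond, hmem]; simp
      have hB : pvStepB (sB, rB) t = (sB, rB) := by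
        simp only [pvStepB]; rw [hmem]; simp
      rw [hA, hB]
      exact ih sA rA sB rB (fun u hu => hne u (List.mem_cons_of_mem _ hu)) ⟨hr, hrne, hsA, hsB⟩
    · have hf : PySem.Set.contains sB t = false := by simpa using hmem
      have hA : pvStepA (sA, rA) t = (PySem.Set.add sA c, rA ++ [t]) := by
        simp only [pvStepA, hc]; rw [hcond, hf]; simp
      have hB : pvStepB (sB, rB) t =
          ((PySem.List.pyRange 1 (t.length : Int) 1).foldl
              (fun s i => PySem.Set.add s (PySem.List.slice t (some i) none ++ PySem.List.slice t none (some i)))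
              (PySem.Set.add sB t), rB ++ [t]) := by
        simp only [pvStepB]; rw [hf]; simp
      rw [hA, hB]
      refine ih _ _ _ _ (fun u hu => hne u (List.mem_cons_of_mem _ hu)) ?_
      refine ⟨by rw [hr], ?_, ?_, ?_⟩
      · intro r hrm
        rcases List.mem_append.mp hrm with h | h
        · exact hrne r h
        · rw [List.mem_singleton.mp h]; exact ht
      · intro x
        rw [PySem.Set.mem_add, hsA]
        constructor
        · rintro (⟨r, hrm, hcr⟩ | rfl)
          · exact ⟨r, List.mem_append.mpr (Or.inl hrm), hcr⟩
          · exact ⟨t, List.mem_append.mpr (Or.inr (List.mem_singleton.mpr rfl)), hc⟩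
        · rintro ⟨r, hrm, hcr⟩
          rcases List.mem_append.mp hrm with h | h
          · exact Or.inl ⟨r, h, hcr⟩
          · rw [List.mem_singleton.mp h] at hcr
            rw [hc] at hcr
            exact Or.inr (Option.some_injective _ hcr).symm
      · intro x
        rw [pv_memB_step t ht sB x, hsB]
        constructor
        · rintro (⟨r, hrm, hrr⟩ | hrr)
          · exact ⟨r, List.mem_append.mpr (Or.inl hrm), hrr⟩
          · exact ⟨t, List.mem_append.mpr (Or.inr (List.mem_singleton.mpr rfl)), hrr⟩
        · rintro ⟨r, hrm, hrr⟩
          rcases List.mem_append.mp hrm with h | h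
          · exact Or.inl ⟨r, h, hrr⟩
          · rw [List.mem_singleton.mp h] at hrr; exact Or.inr hrr

-- ===== VERDICT (by name: the statement is the Claim_ definition above) =====
theorem remove_rotational_duplicates_spec : Claim_equal_remove_rotational_duplicates := by
  intro tuples _ hpre
  unfold Spec_remove_rotational_duplicates remove_rotational_duplicates remove_rotational_duplicates_alt
  refine pv_loop_eq tuples _ _ _ _ (fun t ht he => hpre (he ▸ ht)) ?_
  refine ⟨rfl, by simp, fun x => ?_, fun x => ?_⟩ <;> simp [PySem.Set.empty]
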